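-- pv_equiv track=rewrite | github.com/ayushgoel/PythonScripts | Algo/LeetCode/count-number-of-nice-subarrays.py | convert
-- ===== SOURCE A (Python) =====
-- def convert(nos):
--     no = []
--     cur = 0
--     if nos[0] == -1:
--         no += [0]
--     for i in range(len(nos)):
--         if nos[i] == -1:
--             if cur > 0:
--                 no += [cur]
--                 cur = 0
--             no += [-1]
--         else:
--             cur += 1
--     no += [cur]
--     return no
-- ===== SOURCE B (Python) =====
-- def convert(nos):
--     # Two-pass: build the table of run lengths between -1 markers, then format it.
--     counts = [0]
--     for x in nos:
--         if x == -1: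
--             counts.append(0)
--         else:
--             counts[-1] += 1
--     out = [counts[0]]
--     for c in counts[1:-1]:
--         out += [-1, c] if c > 0 else [-1]
--     if len(counts) > 1:
--         out += [-1, counts[-1]]
--     return out
-- ===== Notes on version B (the rewrite author's own statement) =====
-- stated objective: alternative
-- what changed: A emits the output in one pass with a pending-run counter flushed at each -1; B first builds the run-length table in one pass and then formats it in a second pass (head count, -1 separators, positive interior counts, unconditional last count).
import Mathlib
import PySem

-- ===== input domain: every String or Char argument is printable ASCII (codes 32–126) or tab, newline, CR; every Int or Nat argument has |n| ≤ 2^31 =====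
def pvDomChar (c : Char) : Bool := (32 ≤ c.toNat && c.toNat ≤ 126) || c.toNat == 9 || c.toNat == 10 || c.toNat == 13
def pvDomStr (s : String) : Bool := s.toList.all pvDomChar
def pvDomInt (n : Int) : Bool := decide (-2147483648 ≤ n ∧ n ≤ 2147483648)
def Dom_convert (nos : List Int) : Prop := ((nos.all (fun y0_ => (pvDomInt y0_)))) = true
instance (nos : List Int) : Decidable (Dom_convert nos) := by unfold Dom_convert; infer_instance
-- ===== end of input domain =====

-- B replaces A's emit-as-you-go single pass by a two-pass decomposition: build the
-- run-length table, then format it (objective: alternative; same asymptotic cost).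

-- ===== PORT A =====
-- A's loop body: on -1 flush the pending run count (if positive) and emit -1, else count.
def stepA (st : List Int × Int) (x : Int) : List Int × Int :=
  if x = -1 then
    if st.2 > 0 then (st.1 ++ [st.2] ++ [-1], 0) else (st.1 ++ [-1], st.2)
  else (st.1, st.2 + 1)

def convert (nos : List Int) : List Int :=
  let no : List Int := if PySem.List.pyGet? nos 0 = some (-1) then ([] : List Int) ++ [0] else []
  let st := nos.foldl stepA (no, 0)
  st.1 ++ [st.2]

-- ===== PORT B =====
-- Source B's first pass: counts.append(0) on -1, else counts[-1] += 1
def stepB (cs : List Int) (x : Int) : List Int :=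
  if x = -1 then cs ++ [0] else cs.dropLast ++ [PySem.List.pyGetD cs (-1) 0 + 1]

def convert_alt (nos : List Int) : List Int :=
  let counts := nos.foldl stepB [0]
  let out := (PySem.List.slice counts (some 1) (some (-1))).foldl
      (fun o c => o ++ (if c > 0 then [-1, c] else [-1])) [PySem.List.pyGetD counts 0 0]
  if 1 < counts.length then out ++ [-1, PySem.List.pyGetD counts (-1) 0] else out

-- ===== PRECONDITION & SPEC =====
-- A raises IndexError on the empty list (nos[0]); that single input is excluded.
def Pre_convert (nos : List Int) : Prop := nos ≠ []
instance (nos : List Int) : Decidable (Pre_convert nos) := by unfold Pre_convert; infer_instance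
def pvWitness_convert : List Int := [1, -1, 2]

def Spec_convert (nos : List Int) (out : List Int) : Prop := out = convert_alt nos
instance (nos : List Int) (out : List Int) : Decidable (Spec_convert nos out) := by unfold Spec_convert; infer_instance

-- ===== CLAIM (what is proved, stated in full; the proofs are below) =====
def Claim_equal_convert : Prop := ∀ (nos : List Int), Dom_convert nos → Pre_convert nos → Spec_convert nos (convert nos)

-- ===== LEMMAS AND PROOFS =====

-- rendering of a run-length table in A's style: each count (if positive) before its -1, last count unconditional
def renderA : List Int → List Int
  | [] => []
  | [c] => [c]
  | c :: d :: t => (if c > 0 then [c] else []) ++ (-1 :: renderA (d :: t))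

-- Source B's second pass as a function of the finished counts table (convert_alt = fmtB ∘ first pass, by rfl)
def fmtB (counts : List Int) : List Int :=
  let out := (PySem.List.slice counts (some 1) (some (-1))).foldl
      (fun o c => o ++ (if c > 0 then [-1, c] else [-1])) [PySem.List.pyGetD counts 0 0]
  if 1 < counts.length then out ++ [-1, PySem.List.pyGetD counts (-1) 0] else out

lemma renderA_cons (c q : Int) (t : List Int) :
    renderA (c :: q :: t) = (if c > 0 then [c] else []) ++ (-1 :: renderA (q :: t)) := rfl

lemma foldA_factor (xs : List Int) : ∀ (no : List Int) (cur : Int),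
    xs.foldl stepA (no, cur) = (no ++ (xs.foldl stepA ([], cur)).1, (xs.foldl stepA ([], cur)).2) := by
  induction xs with
  | nil => intro no cur; simp
  | cons x xs ih =>
    intro no cur
    simp only [List.foldl_cons, stepA]
    split_ifs with h1 h2
    · rw [ih (no ++ [cur] ++ [-1]) 0, ih ([] ++ [cur] ++ [-1]) 0]
      simp
    · rw [ih (no ++ [-1]) cur, ih ([] ++ [-1]) cur]
      simp
    · exact ih no (cur + 1)

lemma stepB_ne_nil (cs : List Int) (x : Int) (_h : cs ≠ []) : stepB cs x ≠ [] := by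
  unfold stepB; split_ifs <;> simp

lemma foldB_ne_nil (xs : List Int) : ∀ (cs : List Int), cs ≠ [] → xs.foldl stepB cs ≠ [] := by
  induction xs with
  | nil => intro cs h; simpa
  | cons x xs ih => intro cs h; exact ih _ (stepB_ne_nil cs x h)

lemma stepB_append (a cs : List Int) (x : Int) (h : cs ≠ []) :
    stepB (a ++ cs) x = a ++ stepB cs x := by
  unfold stepB
  split_ifs with hx
  · simp
  · rw [List.dropLast_append_of_ne_nil h,
      PySem.List.pyGetD_neg_one (a ++ cs) 0 (by simp [h]),
      PySem.List.pyGetD_neg_one cs 0 h,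
      List.getLast_append_of_ne_nil (by simp [h]) h]
    simp

lemma foldB_factor (xs : List Int) : ∀ (a cs : List Int), cs ≠ [] →
    xs.foldl stepB (a ++ cs) = a ++ xs.foldl stepB cs := by
  induction xs with
  | nil => intro a cs _; simp
  | cons x xs ih =>
    intro a cs h
    simp only [List.foldl_cons]
    rw [stepB_append a cs x h]
    exact ih a _ (stepB_ne_nil cs x h)

lemma stepB_singleton (c x : Int) (hx : x ≠ -1) : stepB [c] x = [c + 1] := by
  simp [stepB, hx, PySem.List.pyGetD_neg_one [c] 0 (by simp)]

-- A's loop followed by the final 'no += [cur]' equals renderA of Source B's counts table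
lemma main_render (xs : List Int) : ∀ (cur : Int), 0 ≤ cur →
    (xs.foldl stepA ([], cur)).1 ++ [(xs.foldl stepA ([], cur)).2]
      = renderA (xs.foldl stepB [cur]) := by
  induction xs with
  | nil => intro cur _; simp [renderA]
  | cons x xs ih =>
    intro cur hcur
    simp only [List.foldl_cons]
    by_cases hx : x = -1
    · subst hx
      obtain ⟨q, t, hq⟩ := List.exists_cons_of_ne_nil (foldB_ne_nil xs [0] (by simp))
      have h0 := ih 0 le_rfl
      rw [hq] at h0
      by_cases hc : cur > 0
      · have hA : stepA ([], cur) (-1) = ([cur, -1], 0) := by simp [stepA, hc]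
        have hB : stepB [cur] (-1) = [cur] ++ [0] := by simp [stepB]
        rw [hA, hB, foldA_factor xs [cur, -1] 0, foldB_factor xs [cur] [0] (by simp), hq]
        simp only [List.cons_append, List.nil_append]
        rw [renderA_cons, if_pos hc, ← h0]
        simp
      · have hc0 : cur = 0 := le_antisymm (by omega) hcur
        subst hc0
        have hA : stepA ([], 0) (-1) = ([-1], 0) := by simp [stepA]
        have hB : stepB [0] (-1) = [0] ++ [0] := by simp [stepB]
        rw [hA, hB, foldA_factor xs [-1] 0, foldB_factor xs [0] [0] (by simp), hq]
        simp only [List.cons_append, List.nil_append]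
        rw [renderA_cons, if_neg (by omega), ← h0]
        simp
    · have hA : stepA ([], cur) x = ([], cur + 1) := by simp [stepA, hx]
      rw [hA, stepB_singleton cur x hx]
      exact ih (cur + 1) (by omega)

-- the head of the counts table never decreases through the first pass
lemma foldB_head_ge (xs : List Int) : ∀ (c : Int) (t : List Int),
    ∃ d t', xs.foldl stepB (c :: t) = d :: t' ∧ c ≤ d := by
  induction xs with
  | nil => intro c t; exact ⟨c, t, rfl, le_rfl⟩
  | cons x xs ih =>
    intro c t
    simp only [List.foldl_cons]
    by_cases hx : x = -1
    · subst hx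
      have h : stepB (c :: t) (-1) = c :: (t ++ [0]) := by simp [stepB]
      rw [h]; exact ih c (t ++ [0])
    · rcases t with _ | ⟨d, t⟩
      · rw [stepB_singleton c x hx]
        obtain ⟨e, t', h1, h2⟩ := ih (c + 1) []
        exact ⟨e, t', h1, by omega⟩
      · have h : stepB (c :: d :: t) x = c :: stepB (d :: t) x := by
          have := stepB_append [c] (d :: t) x (by simp)
          simpa using this
        rw [h]; exact ih c _

lemma flatMap_tail (t : List Int) (h : t ≠ []) :
    t.dropLast.flatMap (fun c => if c > 0 then [-1, c] else [-1]) ++ [-1, t.getLast h]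
      = -1 :: renderA t := by
  induction t with
  | nil => exact absurd rfl h
  | cons c t ih =>
    rcases t with _ | ⟨d, t⟩
    · simp [renderA]
    · rw [List.dropLast_cons_of_ne_nil (by simp), List.flatMap_cons,
        List.getLast_cons (by simp), renderA_cons, List.append_assoc, ih (by simp)]
      by_cases hc : c > 0 <;> simp [hc]

lemma slice_mid (c : Int) (t : List Int) :
    PySem.List.slice (c :: t) (some 1) (some (-1)) = t.dropLast := by
  simp [PySem.List.slice, List.dropLast_eq_take]

lemma fmtB_cons (c : Int) (t : List Int) :
    fmtB (c :: t) = c :: (if _h : t = [] then [] else -1 :: renderA t) := by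
  unfold fmtB
  rw [slice_mid, PySem.List.pyGetD_zero_cons]
  rcases t with _ | ⟨d, t⟩
  · simp
  · rw [dif_neg (by simp), if_pos (by simp),
      PySem.List.pyGetD_neg_one (c :: d :: t) 0 (by simp),
      List.getLast_cons (by simp),
      PySem.List.foldl_append_eq_flatMap (g := fun c => if c > 0 then [-1, c] else [-1])]
    simp only [List.cons_append, List.nil_append]
    congr 1
    exact flatMap_tail (d :: t) (by simp)

lemma convert_alt_eq (nos : List Int) : convert_alt nos = fmtB (nos.foldl stepB [0]) := rfl

lemma convert_eq (nos : List Int) :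
    convert nos
      = (nos.foldl stepA ((if PySem.List.pyGet? nos 0 = some (-1) then [0] else []), 0)).1
        ++ [(nos.foldl stepA ((if PySem.List.pyGet? nos 0 = some (-1) then [0] else []), 0)).2] := rfl

-- ===== VERDICT (by name: the statement is the Claim_ definition above) =====
theorem convert_spec : Claim_equal_convert := by
  intro nos _ hpre
  unfold Spec_convert
  obtain ⟨y, rest, rfl⟩ := List.exists_cons_of_ne_nil hpre
  rw [convert_alt_eq]
  by_cases hy : y = -1
  · subst hy
    rw [convert_eq, PySem.List.pyGet?_zero_cons, if_pos rfl, foldA_factor (-1 :: rest) [0] 0]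
    rw [List.append_assoc, main_render (-1 :: rest) 0 le_rfl]
    simp only [List.foldl_cons]
    rw [show stepB [0] (-1) = [0] ++ [0] from by simp [stepB],
      foldB_factor rest [0] [0] (by simp)]
    obtain ⟨q, t, hq⟩ := List.exists_cons_of_ne_nil (foldB_ne_nil rest [0] (by simp))
    rw [hq]
    simp only [List.cons_append, List.nil_append]
    rw [fmtB_cons, dif_neg (by simp), renderA_cons, if_neg (by omega)]
    simp
  · rw [convert_eq, PySem.List.pyGet?_zero_cons, if_neg (by simpa using hy)]
    rw [main_render (y :: rest) 0 le_rfl]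
    simp only [List.foldl_cons]
    rw [stepB_singleton 0 y hy]
    simp only [zero_add]
    obtain ⟨d, t', hd, hge⟩ := foldB_head_ge rest 1 []
    rw [hd, fmtB_cons]
    rcases t' with _ | ⟨e, t'⟩
    · simp [renderA]
    · rw [dif_neg (by simp), renderA_cons, if_pos (by omega)]
      simp
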